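-- pv_equiv track=rewrite | github.com/shanesatterfield/hacker-rank | Python/Interview Preparation Kit/Arrays/new_year_chaos/__main__.py | minimum_bribes_naive
-- ===== SOURCE A (Python) =====
-- def minimum_bribes_naive(line):
--     bribes = 0
--
--     for i in range(len(line)):
--         curr = line[i]
--         if curr > (i + 1) + 2:
--             return None
--
--         for j in line[i+1:]:
--             if curr > j:
--                 bribes += 1
--
--     return bribes
-- ===== SOURCE B (Python) =====
-- def minimum_bribes_naive(line):
--     # chaos check in one pre-pass; then inversions counted by
--     # divide-and-conquer merge sort (O(n log n)) instead of nested scans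
--     if any(v > i + 3 for i, v in enumerate(line)):
--         return None
--
--     def sort_count(a):
--         n = len(a)
--         if n < 2:
--             return 0, a
--         inv_l, left = sort_count(a[:n // 2])
--         inv_r, right = sort_count(a[n // 2:])
--         inv = inv_l + inv_r
--         merged = []
--         i = j = 0
--         while i < len(left) and j < len(right):
--             if left[i] <= right[j]:
--                 merged.append(left[i])
--                 i += 1
--             else:
--                 inv += len(left) - i
--                 merged.append(right[j])
--                 j += 1
--         merged.extend(left[i:])
--         merged.extend(right[j:])
--         return inv, merged
--
--     return sort_count(line)[0]
-- ===== Notes on version B (the rewrite author's own statement) =====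
-- stated objective: faster
-- what changed: B does the too-chaotic test in one pre-pass and then counts inversions by divide-and-conquer merge sort (count cross-inversions while merging) instead of A's nested quadratic scan with an interleaved early return.
import Mathlib
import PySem

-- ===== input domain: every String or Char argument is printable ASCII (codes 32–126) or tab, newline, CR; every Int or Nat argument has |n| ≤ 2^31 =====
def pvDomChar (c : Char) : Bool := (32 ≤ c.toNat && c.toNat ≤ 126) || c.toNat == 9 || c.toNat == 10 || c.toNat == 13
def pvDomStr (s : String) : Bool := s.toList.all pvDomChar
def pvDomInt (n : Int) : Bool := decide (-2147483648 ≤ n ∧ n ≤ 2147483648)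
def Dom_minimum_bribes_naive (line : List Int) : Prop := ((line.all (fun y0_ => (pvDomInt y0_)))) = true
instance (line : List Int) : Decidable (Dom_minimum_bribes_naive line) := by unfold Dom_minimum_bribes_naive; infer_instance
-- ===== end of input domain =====

-- B does the too-chaotic test in one pre-pass and then counts inversions by
-- divide-and-conquer merge sort instead of A's nested quadratic scan.

-- ===== PORT A =====
-- loop 'for i in range(len(line))' with early 'return None'
def pvAGo (line : List Int) : List Int → Int → Option Int
  | [], bribes => some bribes
  | i :: is, bribes =>
    match PySem.List.pyGet? line i with
    | none => none  -- unreachable: i comes from range(len(line))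
    | some curr =>
      if curr > (i + 1) + 2 then none
      else pvAGo line is
        ((PySem.List.slice line (some (i + 1)) none).foldl
          (fun b j => if curr > j then b + 1 else b) bribes)

def minimum_bribes_naive (line : List Int) : Option Int :=
  pvAGo line (PySem.List.pyRange 0 line.length 1) 0

-- ===== PORT B =====
-- the merge loop of Source B: while i < len(left) and j < len(right) … then extend leftovers
def pvMerge : List Int → List Int → Int × List Int
  | [], r => (0, r)
  | l, [] => (0, l)
  | x :: xs, y :: ys =>
    if x ≤ y then
      let p := pvMerge xs (y :: ys)
      (p.1, x :: p.2)
    else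
      let p := pvMerge (x :: xs) ys
      (p.1 + ((xs.length : Int) + 1), y :: p.2)
termination_by l r => l.length + r.length

-- Source B's sort_count: split at the middle, recurse, merge while counting cross inversions
def pvSortCount (a : List Int) : Int × List Int :=
  if h : a.length < 2 then (0, a)
  else
    let pl := pvSortCount (a.take (a.length / 2))
    let pr := pvSortCount (a.drop (a.length / 2))
    let pm := pvMerge pl.2 pr.2
    (pl.1 + pr.1 + pm.1, pm.2)
termination_by a.length
decreasing_by
  · simp only [List.length_take]; omega
  · simp only [List.length_drop]; omega

def minimum_bribes_naive_alt (line : List Int) : Option Int :=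
  if (PySem.List.enumerate line).any (fun p => p.2 > p.1 + 3) then none
  else some (pvSortCount line).1

-- ===== PRECONDITION & SPEC =====
def Spec_minimum_bribes_naive (line : List Int) (out : Option Int) : Prop := out = minimum_bribes_naive_alt line
instance (line : List Int) (out : Option Int) : Decidable (Spec_minimum_bribes_naive line out) := by unfold Spec_minimum_bribes_naive; infer_instance

-- ===== CLAIM =====
def Claim_equal_minimum_bribes_naive : Prop := ∀ (line : List Int), Dom_minimum_bribes_naive line → Spec_minimum_bribes_naive line (minimum_bribes_naive line)

-- ===== LEMMAS AND PROOFS =====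

-- 'some element is more than 2 ahead of its 1-based position', from offset k
def pvChaosFrom : List Int → Int → Bool
  | [], _ => false
  | x :: xs, k => (x > (k + 1) + 2) || pvChaosFrom xs (k + 1)

-- suffix (row-wise) inversion count: what A computes when it returns
def pvInv : List Int → Int
  | [] => 0
  | x :: xs => ((xs.filter (fun j => x > j)).length : Int) + pvInv xs

-- cross count: elements of the first list strictly greater than each element of the second
def pvCross (seen : List Int) : List Int → Int
  | [] => 0
  | w :: l => ((seen.filter (fun u => u > w)).length : Int) + pvCross seen l

lemma pvFold_count (x : Int) (l : List Int) : ∀ b : Int,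
    l.foldl (fun b j => if x > j then b + 1 else b) b = b + ((l.filter (fun j => x > j)).length : Int) := by
  induction l with
  | nil => simp
  | cons y l ih =>
    intro b
    simp only [List.foldl_cons, List.filter_cons]
    by_cases h : x > y
    · simp [h, ih (b + 1)]; ring
    · simp [h, ih b]

lemma pvAGo_eq (xs : List Int) : ∀ (n k : Nat) (b : Int), xs.length = k + n →
    pvAGo xs (PySem.List.pyRange (k : Int) (xs.length : Int) 1) b =
      if pvChaosFrom (xs.drop k) (k : Int) then none else some (b + pvInv (xs.drop k)) := by
  intro n
  induction n with
  | zero =>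
    intro k b hk
    rw [PySem.List.pyRange_one_eq_nil (by omega)]
    simp [pvAGo, List.drop_of_length_le (by omega : xs.length ≤ k), pvChaosFrom, pvInv]
  | succ n ih =>
    intro k b hk
    have hklt : k < xs.length := by omega
    rw [PySem.List.pyRange_one_cons (by exact_mod_cast hklt)]
    have hget : PySem.List.pyGet? xs (k : Int) = some xs[k] := by
      rw [PySem.List.pyGet?_natCast]
      exact List.getElem?_eq_getElem hklt
    have hdrop : xs.drop k = xs[k] :: xs.drop (k + 1) :=
      List.drop_eq_getElem_cons hklt
    simp only [pvAGo, hget, hdrop, pvChaosFrom]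
    by_cases hc : xs[k] > ((k : Int) + 1) + 2
    · simp [hc]
    · simp only [hc, if_false]
      have hslice : PySem.List.slice xs (some ((k : Int) + 1)) none = xs.drop (k + 1) := by
        have hcast : ((k : Int) + 1) = ((k + 1 : Nat) : Int) := by push_cast; ring
        rw [hcast, PySem.List.slice_from_natCast]
      rw [hslice, pvFold_count]
      have hcast : ((k : Int) + 1) = ((k + 1 : Nat) : Int) := by push_cast; ring
      rw [hcast, ih (k + 1) _ (by omega)]
      push_cast
      by_cases hcc : pvChaosFrom (xs.drop (k + 1)) ((k : Int) + 1)
      · simp [hcc]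
      · simp [hcc, pvInv]
        ring

-- B's chaos pre-pass agrees with pvChaosFrom
lemma pvAny_eq_chaos (l : List Int) : ∀ s : Int,
    (PySem.List.enumerate l s).any (fun p => p.2 > p.1 + 3) = pvChaosFrom l s := by
  induction l with
  | nil => intro s; simp [PySem.List.enumerate_nil, pvChaosFrom]
  | cons x xs ih =>
    intro s
    rw [PySem.List.enumerate_cons]
    simp only [List.any_cons, ih (s + 1), pvChaosFrom]
    congr 1
    simp only [decide_eq_decide]
    omega

lemma pvCross_nil (l : List Int) : pvCross [] l = 0 := by
  induction l with
  | nil => rfl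
  | cons w l ih => simp [pvCross, ih]

lemma pvCross_cons_left (x : Int) (l1 l2 : List Int) :
    pvCross (x :: l1) l2 = pvCross l1 l2 + ((l2.filter (fun w => x > w)).length : Int) := by
  induction l2 with
  | nil => simp [pvCross]
  | cons w l2 ih =>
    simp only [pvCross, List.filter_cons, ih]
    by_cases h : x > w
    · simp [h]; push_cast; ring
    · simp [h]; ring

-- pvCross as a sum over the right list (for permutation invariance on the right)
lemma pvCross_eq_sum (l1 l2 : List Int) :
    pvCross l1 l2 = (l2.map (fun w => ((l1.filter (fun u => u > w)).length : Int))).sum := by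
  induction l2 with
  | nil => rfl
  | cons w l2 ih => simp [pvCross, ih]

lemma pvCross_perm_right (l1 : List Int) {l2 l2' : List Int} (h : l2.Perm l2') :
    pvCross l1 l2 = pvCross l1 l2' := by
  rw [pvCross_eq_sum, pvCross_eq_sum]
  exact (h.map _).sum_eq

lemma pvCross_perm_left {l1 l1' : List Int} (h : l1.Perm l1') (l2 : List Int) :
    pvCross l1 l2 = pvCross l1' l2 := by
  induction l2 with
  | nil => rfl
  | cons w l2 ih =>
    simp only [pvCross, ih, (h.filter (fun u => decide (u > w))).length_eq]

lemma pvInv_append (l1 l2 : List Int) :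
    pvInv (l1 ++ l2) = pvInv l1 + pvInv l2 + pvCross l1 l2 := by
  induction l1 with
  | nil => simp [pvInv, pvCross_nil]
  | cons x l1 ih =>
    simp only [List.cons_append, pvInv, List.filter_append, List.length_append, ih,
      pvCross_cons_left]
    push_cast
    ring

lemma pvInv_short (a : List Int) (h : a.length < 2) : pvInv a = 0 := by
  match a with
  | [] => rfl
  | [x] => simp [pvInv]
  | x :: y :: t => simp at h

-- merged list is a permutation of the two inputs
lemma pvMerge_perm (l r : List Int) : (pvMerge l r).2.Perm (l ++ r) := by
  induction l, r using pvMerge.induct with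
  | case1 r => simp [pvMerge]
  | case2 l h => cases l with
    | nil => simp [pvMerge]
    | cons x xs => simp [pvMerge]
  | case3 x xs y ys hle ih =>
    simp only [pvMerge, if_pos hle]
    exact (ih.cons x).trans (by simp)
  | case4 x xs y ys hle ih =>
    simp only [pvMerge, if_neg hle]
    exact (ih.cons y).trans List.perm_middle.symm

-- merged list is sorted when both inputs are
lemma pvMerge_sorted {l r : List Int} (hl : l.Sorted (· ≤ ·)) (hr : r.Sorted (· ≤ ·)) :
    (pvMerge l r).2.Sorted (· ≤ ·) := by
  induction l, r using pvMerge.induct with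
  | case1 r => simpa [pvMerge] using hr
  | case2 l h => cases l with
    | nil => simp [pvMerge, List.Sorted]
    | cons x xs => simpa [pvMerge] using hl
  | case3 x xs y ys hle ih =>
    simp only [pvMerge, if_pos hle]
    rw [List.sorted_cons]
    refine ⟨fun b hb => ?_, ih (List.sorted_cons.mp hl).2 hr⟩
    have hb' := (pvMerge_perm xs (y :: ys)).mem_iff.mp hb
    rcases List.mem_append.mp hb' with h1 | h1
    · exact (List.sorted_cons.mp hl).1 b h1
    · rcases List.mem_cons.mp h1 with rfl | h2
      · exact hle
      · exact le_trans hle ((List.sorted_cons.mp hr).1 b h2)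
  | case4 x xs y ys hle ih =>
    simp only [pvMerge, if_neg hle]
    rw [List.sorted_cons]
    refine ⟨fun b hb => ?_, ih hl (List.sorted_cons.mp hr).2⟩
    have hb' := (pvMerge_perm (x :: xs) ys).mem_iff.mp hb
    rcases List.mem_append.mp hb' with h1 | h1
    · rcases List.mem_cons.mp h1 with rfl | h2
      · omega
      · have := (List.sorted_cons.mp hl).1 b h2; omega
    · exact (List.sorted_cons.mp hr).1 b h1

-- the count accumulated while merging is exactly the cross-inversion count
lemma pvMerge_count {l r : List Int} (hl : l.Sorted (· ≤ ·)) (hr : r.Sorted (· ≤ ·)) :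
    (pvMerge l r).1 = pvCross l r := by
  induction l, r using pvMerge.induct with
  | case1 r => simp [pvMerge, pvCross_nil]
  | case2 l h => cases l with
    | nil => simp [pvMerge, pvCross_nil]
    | cons x xs => simp [pvMerge, pvCross]
  | case3 x xs y ys hle ih =>
    simp only [pvMerge, if_pos hle]
    rw [ih (List.sorted_cons.mp hl).2 hr, pvCross_cons_left]
    have hempty : (y :: ys).filter (fun w => decide (x > w)) = [] := by
      apply List.filter_eq_nil_iff.mpr
      intro w hw
      rcases List.mem_cons.mp hw with rfl | h2
      · simp; omega
      · have := (List.sorted_cons.mp hr).1 w h2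
        simp; omega
    simp [hempty]
  | case4 x xs y ys hle ih =>
    simp only [pvMerge, if_neg hle]
    rw [ih hl (List.sorted_cons.mp hr).2]
    have hfull : (x :: xs).filter (fun u => decide (u > y)) = x :: xs := by
      apply List.filter_eq_self.mpr
      intro u hu
      rcases List.mem_cons.mp hu with rfl | h2
      · simp; omega
      · have := (List.sorted_cons.mp hl).1 u h2
        simp; omega
    show pvCross (x :: xs) ys + ((xs.length : Int) + 1) = pvCross (x :: xs) (y :: ys)
    simp only [pvCross, hfull, List.length_cons]
    push_cast
    ring

-- sort_count returns a sorted permutation and exactly pvInv of its input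
lemma pvSortCount_spec (a : List Int) :
    (pvSortCount a).2.Perm a ∧ (pvSortCount a).2.Sorted (· ≤ ·) ∧ (pvSortCount a).1 = pvInv a := by
  induction a using pvSortCount.induct with
  | case1 a h =>
    rw [pvSortCount, dif_pos h]
    refine ⟨List.Perm.refl a, ?_, (pvInv_short a h).symm⟩
    rcases a with _ | ⟨x, _ | ⟨y, t⟩⟩
    · exact List.Pairwise.nil
    · exact List.pairwise_singleton _ _
    · simp at h
  | case2 a h ihl ihr =>
    obtain ⟨hperm1, hsort1, hinv1⟩ := ihl
    obtain ⟨hperm2, hsort2, hinv2⟩ := ihr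
    have hun : pvSortCount a =
        ((pvSortCount (a.take (a.length / 2))).1 + (pvSortCount (a.drop (a.length / 2))).1 +
          (pvMerge (pvSortCount (a.take (a.length / 2))).2 (pvSortCount (a.drop (a.length / 2))).2).1,
         (pvMerge (pvSortCount (a.take (a.length / 2))).2 (pvSortCount (a.drop (a.length / 2))).2).2) := by
      rw [pvSortCount]
      simp only [dif_neg h]
    rw [hun]
    have hperm : (pvMerge (pvSortCount (a.take (a.length / 2))).2 (pvSortCount (a.drop (a.length / 2))).2).2.Perm a := by
      refine (pvMerge_perm _ _).trans ?_
      refine (hperm1.append hperm2).trans ?_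
      rw [List.take_append_drop]
    refine ⟨hperm, pvMerge_sorted hsort1 hsort2, ?_⟩
    simp only
    rw [pvMerge_count hsort1 hsort2, hinv1, hinv2]
    rw [pvCross_perm_left hperm1, pvCross_perm_right _ hperm2]
    conv_rhs => rw [← List.take_append_drop (a.length / 2) a]
    rw [pvInv_append]

-- ===== VERDICT =====
theorem minimum_bribes_naive_spec : Claim_equal_minimum_bribes_naive := by
  intro line _
  unfold Spec_minimum_bribes_naive minimum_bribes_naive minimum_bribes_naive_alt
  have hA := pvAGo_eq line line.length 0 0 (by omega)
  simp only [Nat.cast_zero, List.drop_zero] at hA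
  rw [hA, pvAny_eq_chaos line 0]
  by_cases hc : pvChaosFrom line 0
  · simp [hc]
  · simp [hc, (pvSortCount_spec line).2.2]
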